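-- pv_equiv track=rewrite | github.com/dmnlegendary/Programas_VisionArtificial_Horacio | 5_MatrizEvolutiva/matrizE.py | matriz_sumatoria
-- ===== SOURCE A (Python) =====
-- def matriz_sumatoria(matriz, matrizSumatoria):
--     #Sumar todos los valores de una fila
--     #ir iterando por cada fila
--     for i in range(len(matriz)):
--         suma = 0
--         for j in range(len(matriz[i])):
--             suma += matriz[i][j]
--             if matriz[i][j] != 0:
--                 matrizSumatoria[i][j] += suma
--     return matrizSumatoria
-- ===== SOURCE B (Python) =====
-- def matriz_sumatoria(matriz, matrizSumatoria):
--     # For each nonzero cell, add the row's prefix sum up to that cell,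
--     # recomputed directly as sum(fila[:j+1]) instead of a running accumulator.
--     for i, fila in enumerate(matriz):
--         for j, v in enumerate(fila):
--             if v != 0:
--                 matrizSumatoria[i][j] += sum(fila[:j + 1])
--     return matrizSumatoria
-- ===== Notes on version B (the rewrite author's own statement) =====
-- stated objective: simpler
-- what changed: Replaces the index loop with a running accumulator by enumerate loops that recompute each needed prefix sum directly as sum(fila[:j+1]), so no loop-carried state is kept.
import Mathlib
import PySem

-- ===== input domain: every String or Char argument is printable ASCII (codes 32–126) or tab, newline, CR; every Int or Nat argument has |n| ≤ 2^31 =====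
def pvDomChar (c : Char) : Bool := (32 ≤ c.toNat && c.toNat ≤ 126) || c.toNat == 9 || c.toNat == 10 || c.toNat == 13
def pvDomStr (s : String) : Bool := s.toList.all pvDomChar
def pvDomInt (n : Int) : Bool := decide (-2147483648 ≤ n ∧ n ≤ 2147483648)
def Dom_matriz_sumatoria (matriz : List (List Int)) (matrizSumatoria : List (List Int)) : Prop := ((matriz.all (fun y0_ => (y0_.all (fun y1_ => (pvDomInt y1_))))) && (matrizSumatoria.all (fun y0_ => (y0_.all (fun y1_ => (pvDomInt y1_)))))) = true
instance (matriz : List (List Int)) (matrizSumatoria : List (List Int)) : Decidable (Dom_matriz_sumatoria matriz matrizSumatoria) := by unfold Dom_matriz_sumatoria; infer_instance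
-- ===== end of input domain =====

-- B replaces A's running-accumulator index loop by enumerate loops that recompute each
-- prefix sum directly as sum(fila[:j+1]); simpler, not faster. Both mutate matrizSumatoria
-- in place identically; the equivalence proved is about the returned value.

-- ===== PORT A =====
-- matrizSumatoria[i][j] += s  (total form; Pre_ excludes the out-of-range case, where Python raises)
def pvWriteA (mS : List (List Int)) (i j : Int) (s : Int) : List (List Int) :=
  PySem.List.pySetD mS i
    (PySem.List.pySetD (PySem.List.pyGetD mS i []) j
      (PySem.List.pyGetD (PySem.List.pyGetD mS i []) j 0 + s))

def matriz_sumatoria (matriz : List (List Int)) (matrizSumatoria : List (List Int)) : List (List Int) :=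
  (PySem.List.pyRange 0 (matriz.length : Int) 1).foldl (fun acc i =>
    ((PySem.List.pyRange 0 ((PySem.List.pyGetD matriz i []).length : Int) 1).foldl
      (fun (st : Int × List (List Int)) j =>
        let x := PySem.List.pyGetD (PySem.List.pyGetD matriz i []) j 0
        (st.1 + x, if x ≠ 0 then pvWriteA st.2 i j (st.1 + x) else st.2))
      (0, acc)).2) matrizSumatoria

-- ===== PORT B =====
-- matrizSumatoria[i][j] += s  (B performs the same in-place update statement)
def pvBumpB (mS : List (List Int)) (i j : Int) (s : Int) : List (List Int) :=
  PySem.List.pySetD mS i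
    (PySem.List.pySetD (PySem.List.pyGetD mS i []) j
      (PySem.List.pyGetD (PySem.List.pyGetD mS i []) j 0 + s))

def matriz_sumatoria_alt (matriz : List (List Int)) (matrizSumatoria : List (List Int)) : List (List Int) :=
  (PySem.List.enumerate matriz).foldl (fun acc p =>
    (PySem.List.enumerate p.2).foldl (fun acc2 q =>
      if q.2 ≠ 0 then
        pvBumpB acc2 p.1 q.1 ((PySem.List.slice p.2 none (some (q.1 + 1))).sum)
      else acc2) acc) matrizSumatoria

-- ===== PRECONDITION & SPEC =====
-- Pre_ excludes exactly the inputs where the Python raises IndexError: a nonzero cell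
-- matriz[i][j] whose target slot matrizSumatoria[i][j] does not exist.
def Pre_matriz_sumatoria (matriz : List (List Int)) (matrizSumatoria : List (List Int)) : Prop :=
  ∀ i < matriz.length, ∀ j < (matriz.getD i []).length,
    (matriz.getD i []).getD j 0 ≠ 0 →
      i < matrizSumatoria.length ∧ j < (matrizSumatoria.getD i []).length
instance (matriz : List (List Int)) (matrizSumatoria : List (List Int)) : Decidable (Pre_matriz_sumatoria matriz matrizSumatoria) := by unfold Pre_matriz_sumatoria; infer_instance

def pvWitness_matriz_sumatoria : List (List Int) × List (List Int) :=
  ([[1, 0, 2], [3]], [[10, 20, 30], [40]])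

def Spec_matriz_sumatoria (matriz : List (List Int)) (matrizSumatoria : List (List Int)) (out : List (List Int)) : Prop := out = matriz_sumatoria_alt matriz matrizSumatoria
instance (matriz : List (List Int)) (matrizSumatoria : List (List Int)) (out : List (List Int)) : Decidable (Spec_matriz_sumatoria matriz matrizSumatoria out) := by unfold Spec_matriz_sumatoria; infer_instance

-- ===== CLAIM (what is proved, stated in full; the proofs are below) =====
def Claim_equal_matriz_sumatoria : Prop := ∀ (matriz : List (List Int)) (matrizSumatoria : List (List Int)), Dom_matriz_sumatoria matriz matrizSumatoria → Pre_matriz_sumatoria matriz matrizSumatoria → Spec_matriz_sumatoria matriz matrizSumatoria (matriz_sumatoria matriz matrizSumatoria)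

-- ===== LEMMAS AND PROOFS =====

-- Inner-loop invariant: over the first n indices, A's (suma, mS) state is
-- ((fila.take n).sum, B's fold over those indices).
theorem inner_aux (fila : List Int) (i : Int) (n : Nat) (hn : n ≤ fila.length) (mS : List (List Int)) :
    (PySem.List.pyRange 0 (n : Int) 1).foldl
      (fun (st : Int × List (List Int)) j =>
        let x := PySem.List.pyGetD fila j 0
        (st.1 + x, if x ≠ 0 then pvWriteA st.2 i j (st.1 + x) else st.2)) (0, mS)
    = ((fila.take n).sum,
       (PySem.List.pyRange 0 (n : Int) 1).foldl
        (fun acc2 j =>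
          if PySem.List.pyGetD fila j 0 ≠ 0 then
            pvBumpB acc2 i j ((PySem.List.slice fila none (some (j + 1))).sum)
          else acc2) mS) := by
  induction n with
  | zero =>
      simp [PySem.List.pyRange_one_eq_nil (by omega : (0:Int) ≤ 0)]
  | succ n ih =>
      have hn' : n ≤ fila.length := Nat.le_of_succ_le hn
      have hlt : n < fila.length := hn
      have hcast : ((n + 1 : Nat) : Int) = (n : Int) + 1 := by push_cast; ring
      rw [hcast, PySem.List.pyRange_one_succ_right (by positivity), List.foldl_append,
        List.foldl_append, ih hn']
      simp only [List.foldl_cons, List.foldl_nil]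
      have hx : PySem.List.pyGetD fila (n : Int) 0 = fila[n] := by
        rw [PySem.List.pyGetD_natCast]; simp [List.getD, hlt]
      have hslice : (PySem.List.slice fila none (some ((n : Int) + 1))).sum
          = (fila.take n).sum + fila[n] := by
        rw [← hcast, PySem.List.slice_to_natCast, List.sum_take_succ fila n hlt]
      simp only [hx, hslice, pvWriteA, pvBumpB]
      rw [List.sum_take_succ fila n hlt]

-- Per-row equivalence: A's inner loop's matrix equals B's inner fold over enumerate fila.
theorem inner_main (fila : List Int) (i : Int) (mS : List (List Int)) :
    ((PySem.List.pyRange 0 (fila.length : Int) 1).foldl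
      (fun (st : Int × List (List Int)) j =>
        let x := PySem.List.pyGetD fila j 0
        (st.1 + x, if x ≠ 0 then pvWriteA st.2 i j (st.1 + x) else st.2)) (0, mS)).2
    = (PySem.List.enumerate fila).foldl (fun acc2 q =>
        if q.2 ≠ 0 then
          pvBumpB acc2 i q.1 ((PySem.List.slice fila none (some (q.1 + 1))).sum)
        else acc2) mS := by
  rw [PySem.List.enumerate_eq_map_pyRange fila (0 : Int), List.foldl_map,
    inner_aux fila i fila.length (le_refl _) mS]
  simp [PySem.List.len_eq]

-- ===== VERDICT (by name: the statement is the Claim_ definition above) =====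
theorem matriz_sumatoria_spec : Claim_equal_matriz_sumatoria := by
  intro matriz matrizSumatoria _ _
  unfold Spec_matriz_sumatoria matriz_sumatoria matriz_sumatoria_alt
  rw [PySem.List.enumerate_eq_map_pyRange matriz ([] : List Int), List.foldl_map]
  simp only [PySem.List.len_eq]
  exact PySem.List.foldl_congr_mem _ _ _ _ (by
    intro acc x hx
    exact inner_main (PySem.List.pyGetD matriz x []) x acc)
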